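-- pv_equiv track=rewrite | github.com/NeilAgar/party-zoo | code/helper_functions/menu_select.py | get_picture_positions
-- ===== SOURCE A (Python) =====
-- def get_y_pos(spacing, picture_height, title_height, game_number):
--     pos = spacing + title_height
--     pos += spacing * (((game_number - 1) // 3) + 1)
--     pos += picture_height * ((game_number - 1) // 3)
--     return pos
--
-- def get_x_pos(spacing, picture_width, game_number):
--     row = (game_number - 1) % 3
--     pos = spacing * (row + 1)
--     pos += picture_width * row
--     return pos
--
-- def get_picture_positions(width_spacing, height_spacing, picture_width, picture_height, title_height, number_of_games):
--     positions = []
--     for num in range(1, number_of_games+1):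
--         positions.append(
--             (get_x_pos(width_spacing, picture_width, num),
--              get_y_pos(height_spacing, picture_height, title_height, num))
--         )
--
--     return positions
-- ===== SOURCE B (Python) =====
-- def get_picture_positions(width_spacing, height_spacing, picture_width, picture_height, title_height, number_of_games):
--     positions = []
--     count = 0
--     y = title_height + 2 * height_spacing
--     while count < number_of_games:
--         x = width_spacing
--         for _ in range(3):
--             positions.append((x, y))
--             count += 1
--             if count >= number_of_games:
--                 break
--             x += width_spacing + picture_width
--         y += height_spacing + picture_height
--     return positions
-- ===== Notes on version B (the rewrite author's own statement) =====
-- stated objective: faster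
-- what changed: Replaces the flat loop over game numbers with //3 and %3 row/column arithmetic per element by a nested 2D traversal (outer row loop, inner 3-column loop) that maintains x and y incrementally and stops via a running count.
import Mathlib
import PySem

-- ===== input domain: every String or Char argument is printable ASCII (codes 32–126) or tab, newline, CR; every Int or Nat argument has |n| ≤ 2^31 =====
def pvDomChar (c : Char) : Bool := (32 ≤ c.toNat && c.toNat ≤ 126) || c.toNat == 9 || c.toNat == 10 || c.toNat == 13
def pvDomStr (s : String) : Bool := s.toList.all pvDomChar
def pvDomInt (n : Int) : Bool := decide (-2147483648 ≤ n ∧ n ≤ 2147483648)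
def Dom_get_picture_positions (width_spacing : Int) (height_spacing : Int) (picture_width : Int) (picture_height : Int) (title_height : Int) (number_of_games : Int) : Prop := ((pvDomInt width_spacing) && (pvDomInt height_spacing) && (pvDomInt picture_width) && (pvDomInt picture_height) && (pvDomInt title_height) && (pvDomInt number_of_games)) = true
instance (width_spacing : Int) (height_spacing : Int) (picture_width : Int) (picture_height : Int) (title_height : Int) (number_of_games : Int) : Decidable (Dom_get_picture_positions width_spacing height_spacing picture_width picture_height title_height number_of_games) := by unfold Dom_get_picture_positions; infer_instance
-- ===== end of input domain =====

-- B replaces A's flat loop with //3 and %3 arithmetic by a nested 2D grid traversal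
-- (outer row loop, inner 3-column loop) with incremental x/y and a count-based stop.


-- ===== PORT A =====
def get_y_pos (spacing : Int) (picture_height : Int) (title_height : Int) (game_number : Int) : Int :=
  let pos := spacing + title_height
  let pos := pos + spacing * (PySem.Int.floordiv (game_number - 1) 3 + 1)
  let pos := pos + picture_height * (PySem.Int.floordiv (game_number - 1) 3)
  pos

def get_x_pos (spacing : Int) (picture_width : Int) (game_number : Int) : Int :=
  let row := PySem.Int.mod (game_number - 1) 3
  let pos := spacing * (row + 1)
  let pos := pos + picture_width * row
  pos

def get_picture_positions (width_spacing : Int) (height_spacing : Int) (picture_width : Int) (picture_height : Int) (title_height : Int) (number_of_games : Int) : List (Int × Int) :=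
  (PySem.List.pyRange 1 (number_of_games + 1) 1).foldl
    (fun positions num =>
      positions ++ [(get_x_pos width_spacing picture_width num,
                     get_y_pos height_spacing picture_height title_height num)])
    []

-- ===== PORT B =====
-- inner 'for _ in range(3)' loop of Source B: emits up to `cols` cells of one row,
-- stepping x by ws+pw, breaking when the remaining count hits 0
def altInner (ws pw : Int) : Int → Int → Nat → Nat → List (Int × Int)
  | _, _, 0, _ => []
  | _, _, _ + 1, 0 => []
  | x, y, rem + 1, cols + 1 =>
      (x, y) :: (if rem = 0 then [] else altInner ws pw (x + (ws + pw)) y rem cols)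

-- outer 'while count < number_of_games' loop of Source B, on the remaining count
def altRows (ws hs pw ph : Int) (y : Int) : Nat → List (Int × Int)
  | 0 => []
  | m + 1 =>
      altInner ws pw ws y (m + 1) 3 ++
        altRows ws hs pw ph (y + (hs + ph)) ((m + 1) - min (m + 1) 3)
  termination_by m => m
  decreasing_by omega

def get_picture_positions_alt (width_spacing : Int) (height_spacing : Int) (picture_width : Int) (picture_height : Int) (title_height : Int) (number_of_games : Int) : List (Int × Int) :=
  altRows width_spacing height_spacing picture_width picture_height
    (title_height + 2 * height_spacing) number_of_games.toNat

-- ===== PRECONDITION & SPEC =====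
def Spec_get_picture_positions (width_spacing : Int) (height_spacing : Int) (picture_width : Int) (picture_height : Int) (title_height : Int) (number_of_games : Int) (out : List (Int × Int)) : Prop := out = get_picture_positions_alt width_spacing height_spacing picture_width picture_height title_height number_of_games
instance (width_spacing : Int) (height_spacing : Int) (picture_width : Int) (picture_height : Int) (title_height : Int) (number_of_games : Int) (out : List (Int × Int)) : Decidable (Spec_get_picture_positions width_spacing height_spacing picture_width picture_height title_height number_of_games out) := by unfold Spec_get_picture_positions; infer_instance

-- ===== CLAIM (what is proved, stated in full; the proofs are below) =====
def Claim_equal_get_picture_positions : Prop := ∀ (width_spacing : Int) (height_spacing : Int) (picture_width : Int) (picture_height : Int) (title_height : Int) (number_of_games : Int), Dom_get_picture_positions width_spacing height_spacing picture_width picture_height title_height number_of_games → Spec_get_picture_positions width_spacing height_spacing picture_width picture_height title_height number_of_games (get_picture_positions width_spacing height_spacing picture_width picture_height title_height number_of_games)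

-- ===== LEMMAS AND PROOFS =====
lemma foldl_append_map {α β : Type} (g : α → β) (l : List α) (acc : List β) :
    l.foldl (fun a x => a ++ [g x]) acc = acc ++ l.map g := by
  induction l generalizing acc with
  | nil => simp
  | cons h t ih => simp [List.foldl, ih]

-- closed form of A: element i (0-based) of the list
lemma portA_eq_map (ws hs pw ph th n : Int) :
    get_picture_positions ws hs pw ph th n =
      (List.range n.toNat).map (fun i =>
        (ws + ((i % 3 : Nat) : Int) * (ws + pw),
         (th + 2 * hs) + ((i / 3 : Nat) : Int) * (hs + ph))) := by
  unfold get_picture_positions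
  rw [PySem.List.pyRange_one, foldl_append_map]
  have : (n + 1 - 1).toNat = n.toNat := by omega
  rw [this, List.nil_append, List.map_map]
  apply List.map_congr_left
  intro i _
  simp only [Function.comp, get_x_pos, get_y_pos]
  have h1 : (1 : Int) + (i : Int) - 1 = (i : Nat) := by omega
  have hf : PySem.Int.floordiv (i : Int) 3 = ((i / 3 : Nat) : Int) := by
    exact_mod_cast PySem.Int.floordiv_natCast i 3
  have hm : PySem.Int.mod (i : Int) 3 = ((i % 3 : Nat) : Int) := by
    exact_mod_cast PySem.Int.mod_natCast i 3
  rw [h1, hf, hm]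
  simp only [Prod.mk.injEq]
  constructor <;> ring

lemma altInner_eq_map (ws pw : Int) (x y : Int) (m c : Nat) :
    altInner ws pw x y m c =
      (List.range (min m c)).map (fun j : Nat => (x + (j : Int) * (ws + pw), y)) := by
  induction c generalizing x m with
  | zero => cases m <;> simp [altInner]
  | succ c ih =>
    cases m with
    | zero => simp [altInner]
    | succ m =>
      rw [altInner]
      by_cases hm : m = 0
      · subst hm; simp
      · have hmin : min (m + 1) (c + 1) = min m c + 1 := by omega
        rw [if_neg hm, ih, hmin, List.range_succ_eq_map]
        simp only [List.map_cons, List.map_map]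
        congr 1
        · simp
        · apply List.map_congr_left
          intro j _
          simp only [Function.comp]
          simp only [Prod.mk.injEq]
          constructor
          · push_cast; ring
          · trivial

lemma altRows_eq_map (ws hs pw ph : Int) (y : Int) (m : Nat) :
    altRows ws hs pw ph y m =
      (List.range m).map (fun i =>
        (ws + ((i % 3 : Nat) : Int) * (ws + pw), y + ((i / 3 : Nat) : Int) * (hs + ph))) := by
  induction m using Nat.strong_induction_on generalizing y with
  | _ m ih =>
    match m with
    | 0 => simp [altRows]
    | m + 1 =>
      rw [altRows, altInner_eq_map,
          ih ((m + 1) - min (m + 1) 3) (by omega) (y + (hs + ph))]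
      have hsplit : m + 1 = min (m + 1) 3 + ((m + 1) - min (m + 1) 3) := by omega
      rw [show List.range (m + 1) = List.range (min (m + 1) 3 + ((m + 1) - min (m + 1) 3)) from by rw [← hsplit],
          List.range_add, List.map_append, List.map_map]
      congr 1
      · apply List.map_congr_left
        intro j hj
        simp only [List.mem_range] at hj
        have hj3 : j < 3 := by omega
        have h1 : j % 3 = j := Nat.mod_eq_of_lt hj3
        have h2 : j / 3 = 0 := Nat.div_eq_of_lt hj3
        rw [h1, h2]
        simp
      · apply List.map_congr_left
        intro j _
        simp only [Function.comp]
        by_cases h : m + 1 ≤ 3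
        · -- then the tail range is empty, handled by membership; but prove directly:
          have : (m + 1) - min (m + 1) 3 = 0 := by omega
          -- j ∈ range 0 is impossible; derive from the rewritten goal via omega on membership
          simp [this] at *
        · have hmin : min (m + 1) 3 = 3 := by omega
          rw [hmin]
          have h1 : (3 + j) % 3 = j % 3 := by omega
          have h2 : (3 + j) / 3 = j / 3 + 1 := by omega
          rw [h1, h2]
          simp only [Prod.mk.injEq]
          constructor
          · trivial
          · push_cast; ring

-- ===== VERDICT (by name: the statement is the Claim_ definition above) =====
theorem get_picture_positions_spec : Claim_equal_get_picture_positions := by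
  intro ws hs pw ph th n _
  unfold Spec_get_picture_positions get_picture_positions_alt
  rw [portA_eq_map, altRows_eq_map]
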